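-- pv_equiv track=rewrite | github.com/aosp-mirror/platform_build | tools/soong_to_convert.py | process
-- ===== SOURCE A (Python) =====
-- def count_deps(depsdb, module, seen):
--     """Based on the depsdb, count the number of transitive dependencies.
--
--     You can pass in an reversed dependency graph to conut the number of
--     modules that depend on the module."""
--     count = 0
--     seen.append(module)
--     if module in depsdb:
--         for dep in depsdb[module]:
--             if dep in seen:
--                 continue
--             count += 1 + count_deps(depsdb, dep, seen)
--     return count
--
-- def process(reader):
--     """Read the input file and produce a list of modules ready to move to Soong
--     """
--     problems = dict()
--     deps = dict()
--     reverse_deps = dict()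
--     module_types = dict()
--
--     for (module, module_type, problem, dependencies) in reader:
--         module_types[module] = module_type
--         problems[module] = problem
--         deps[module] = [d for d in dependencies.strip().split(' ') if d != ""]
--         for dep in deps[module]:
--             if not dep in reverse_deps:
--                 reverse_deps[dep] = []
--             reverse_deps[dep].append(module)
--
--     results = []
--     for module in problems:
--         # Only display actionable conversions, ones without missing dependencies
--         if len(deps[module]) != 0:
--             continue
--
--         extra = ""
--         if len(problems[module]) > 0:
--             extra = " ({})".format(problems[module])
--         results.append((count_deps(reverse_deps, module, []), module + extra, module_types[module]))
--
--     return sorted(results, key=lambda result: (-result[0], result[1]))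
-- ===== SOURCE B (Python) =====
-- def _count_rdeps(rdeps, module):
--     """Iterative worklist traversal: count distinct modules reachable through
--     the reverse-dependency graph, excluding the start module."""
--     visited = {module}
--     stack = list(reversed(rdeps.get(module, [])))
--     while stack:
--         d = stack.pop()
--         if d in visited:
--             continue
--         visited.add(d)
--         stack.extend(reversed(rdeps.get(d, [])))
--     return len(visited) - 1
--
-- def process(reader):
--     parsed = [(m, t, p, [x for x in d.strip().split(' ') if x != ""])
--               for (m, t, p, d) in reader]
--     module_types = {m: t for (m, t, _p, _ds) in parsed}
--     problems = {m: p for (m, _t, p, _ds) in parsed}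
--     deps = {m: ds for (m, _t, _p, ds) in parsed}
--     rdeps = {}
--     for (m, _t, _p, ds) in parsed:
--         for d in ds:
--             rdeps.setdefault(d, []).append(m)
--     results = [(_count_rdeps(rdeps, m),
--                 m + (" ({})".format(problems[m]) if problems[m] != "" else ""),
--                 module_types[m])
--                for m in problems if deps[m] == []]
--     return sorted(results, key=lambda r: (-r[0], r[1]))
-- ===== Notes on version B (the rewrite author's own statement) =====
-- stated objective: alternative
-- what changed: count_deps's recursive DFS with a shared mutable `seen` list (linear `dep in seen` scans) is replaced by an iterative worklist traversal with an explicit stack and a visited hash set, returning len(visited)-1.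
import Mathlib
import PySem

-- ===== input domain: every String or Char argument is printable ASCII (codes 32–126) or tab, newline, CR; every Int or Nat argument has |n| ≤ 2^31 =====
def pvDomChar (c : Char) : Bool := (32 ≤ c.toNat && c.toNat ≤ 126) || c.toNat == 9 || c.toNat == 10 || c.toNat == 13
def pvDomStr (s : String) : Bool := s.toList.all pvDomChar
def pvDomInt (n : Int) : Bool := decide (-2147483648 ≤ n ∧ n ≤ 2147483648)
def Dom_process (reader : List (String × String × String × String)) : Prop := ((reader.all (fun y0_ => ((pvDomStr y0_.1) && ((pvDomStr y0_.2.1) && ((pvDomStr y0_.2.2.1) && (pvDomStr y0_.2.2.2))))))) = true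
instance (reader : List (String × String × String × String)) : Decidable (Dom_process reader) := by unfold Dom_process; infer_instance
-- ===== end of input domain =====

-- B replaces A's recursive shared-`seen` count_deps by an iterative worklist traversal with an
-- explicit stack and a visited set (objective: alternative — it avoids count_deps's linear
-- `dep in seen` list scans). Return-value equivalence; A mutates its `seen` argument in place
-- (its only caller passes a fresh []).

-- shared helper: `[d for d in s.strip().split(' ') if d != ""]` (identical code in both Pythons)
def pvSplitDeps (s : String) : List String :=
  ((PySem.Str.split? (PySem.Str.strip s) " ").getD []).filter (fun d => d ≠ "")

-- shared totality fuel for the two graph traversals (a Lean-side guard only, both Pythons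
-- terminate; proved sufficient below): 1 + initial stack + total size of the deps db
def pvFuel (db : PySem.Dict String (List String)) (m : String) : Nat :=
  (db.getD m []).length + ((db.items.map (fun kv => kv.2.length)).sum) + 1

-- ===== PORT A =====

-- count_deps's loop `for dep in depsdb[module]: if dep in seen: continue; count += 1 + count_deps(...)`,
-- fuel-threaded (leftover fuel is returned, with g ≤ f so the recursion is well-founded)
def pvCountList (db : PySem.Dict String (List String)) :
    (f : Nat) → List String → List String → Option (Int × List String × {g : Nat // g ≤ f})
  | f, [], seen => some (0, seen, ⟨f, Nat.le_refl f⟩)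
  | 0, _ :: _, _ => none
  | f+1, d :: rest, seen =>
    if d ∈ seen then
      match pvCountList db f rest seen with
      | none => none
      | some (c, s, ⟨g, hg⟩) => some (c, s, ⟨g, by omega⟩)
    else
      match pvCountList db f (db.getD d []) (seen ++ [d]) with
      | none => none
      | some (c1, s1, ⟨f1, h1⟩) =>
        match pvCountList db f1 rest s1 with
        | none => none
        | some (c2, s2, ⟨f2, h2⟩) => some (1 + c1 + c2, s2, ⟨f2, by omega⟩)
  termination_by f deps _ => (f, deps.length)
  decreasing_by · omega
                · omega
                · exact Prod.Lex.left _ _ (by omega)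

-- count_deps(depsdb, module, seen): seen.append(module), then the loop (0 is unreachable: pvFuel suffices)
def pvCountDeps (db : PySem.Dict String (List String)) (m : String) (seen : List String) : Int :=
  match pvCountList db (pvFuel db m) (db.getD m []) (seen ++ [m]) with
  | some (c, _, _) => c
  | none => 0

def process (reader : List (String × String × String × String)) : List (Int × String × String) :=
  let st := reader.foldl
    (fun st row =>
      (st.1.insert row.1 row.2.1,
       st.2.1.insert row.1 row.2.2.1,
       st.2.2.1.insert row.1 (pvSplitDeps row.2.2.2),
       (pvSplitDeps row.2.2.2).foldl
         (fun rd dep => rd.modify dep [] (fun l => l ++ [row.1])) st.2.2.2))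
    (PySem.Dict.empty, PySem.Dict.empty, PySem.Dict.empty, PySem.Dict.empty)
  let module_types := st.1
  let problems := st.2.1
  let deps := st.2.2.1
  let reverse_deps := st.2.2.2
  let results := problems.keys.foldl
    (fun res m =>
      if (deps.getD m []).length ≠ 0 then res
      else
        res ++ [(pvCountDeps reverse_deps m [],
                 m ++ (if 0 < PySem.Str.len (problems.getD m "")
                       then " (" ++ problems.getD m "" ++ ")" else ""),
                 module_types.getD m "")])
    []
  PySem.List.sorted2 results (fun r => -r.1) (fun r => r.2.1)

-- ===== PORT B =====

-- Source B's while loop: pop a node, skip if visited, else mark visited and push its reverse-deps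
-- (list head = top of the work stack; fuel is the totality guard, proved sufficient below)
def pvBLoop (db : PySem.Dict String (List String)) :
    Nat → List String → List String → Option (List String)
  | _, [], visited => some visited
  | 0, _ :: _, _ => none
  | f+1, d :: rest, visited =>
    if d ∈ visited then pvBLoop db f rest visited
    else pvBLoop db f (db.getD d [] ++ rest) (PySem.Set.add visited d)

-- _count_rdeps(rdeps, module)
def pvCountRdeps (db : PySem.Dict String (List String)) (m : String) : Int :=
  match pvBLoop db (pvFuel db m) (db.getD m []) [m] with
  | some visited => (visited.length : Int) - 1
  | none => 0

def process_alt (reader : List (String × String × String × String)) : List (Int × String × String) :=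
  let parsed := reader.map (fun r => (r.1, r.2.1, r.2.2.1, pvSplitDeps r.2.2.2))
  let module_types := parsed.foldl (fun d r => d.insert r.1 r.2.1) PySem.Dict.empty
  let problems := parsed.foldl (fun d r => d.insert r.1 r.2.2.1) PySem.Dict.empty
  let deps := parsed.foldl (fun d r => d.insert r.1 r.2.2.2) PySem.Dict.empty
  let rdeps := parsed.foldl
    (fun d r => r.2.2.2.foldl (fun d' dep => d'.modify dep [] (fun l => l ++ [r.1])) d)
    PySem.Dict.empty
  let results := (problems.keys.filter (fun m => deps.getD m [] == [])).map
    (fun m =>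
      (pvCountRdeps rdeps m,
       m ++ (if problems.getD m "" ≠ "" then " (" ++ problems.getD m "" ++ ")" else ""),
       module_types.getD m ""))
  PySem.List.sorted2 results (fun r => -r.1) (fun r => r.2.1)

-- ===== PRECONDITION & SPEC =====
def Spec_process (reader : List (String × String × String × String)) (out : List (Int × String × String)) : Prop := out = process_alt reader
instance (reader : List (String × String × String × String)) (out : List (Int × String × String)) : Decidable (Spec_process reader out) := by unfold Spec_process; infer_instance

-- ===== CLAIM (what is proved, stated in full; the proofs are below) =====
def Claim_equal_process : Prop := ∀ (reader : List (String × String × String × String)), Dom_process reader → Spec_process reader (process reader)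

-- ===== LEMMAS AND PROOFS =====

-- sum of the non-visited rows of the deps db: the traversals' potential
def pvSfree (db : PySem.Dict String (List String)) (seen : List String) : Nat :=
  ((db.items.filter (fun kv => decide (kv.1 ∉ seen))).map (fun kv => kv.2.length)).sum

theorem pvSum_le_of_sublist {l m : List (String × List String)}
    (h : l.Sublist m) :
    (l.map (fun kv => kv.2.length)).sum ≤ (m.map (fun kv => kv.2.length)).sum := by
  induction h with
  | slnil => simp
  | cons _ _ ih => simp; omega
  | cons₂ _ _ ih => simp; omega

theorem pvSum_remove {l : List (String × List String)} {d : String} {vs : List String}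
    (h : (d, vs) ∈ l) :
    ((l.filter (fun kv => decide (kv.1 ≠ d))).map (fun kv => kv.2.length)).sum + vs.length ≤
      (l.map (fun kv => kv.2.length)).sum := by
  induction l with
  | nil => simp at h
  | cons a t ih =>
    rcases List.mem_cons.mp h with h1 | h1
    · subst h1
      have hhead : ((d, vs) :: t).filter (fun kv => decide (kv.1 ≠ d)) =
          t.filter (fun kv => decide (kv.1 ≠ d)) := by simp
      rw [hhead, List.map_cons, List.sum_cons, show ((d, vs).2) = vs from rfl]
      have := pvSum_le_of_sublist (List.filter_sublist (l := t) (p := fun kv => decide (kv.1 ≠ d)))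
      omega
    · have ih' := ih h1
      simp only [ne_eq] at ih' ⊢
      by_cases ha : a.1 = d
      · simp only [List.filter_cons, ha, not_true_eq_false,
          decide_false, Bool.false_eq_true, if_false, List.map_cons, List.sum_cons]
        omega
      · simp only [List.filter_cons, ha, not_false_eq_true,
          decide_true, if_true, List.map_cons, List.sum_cons]
        omega

theorem pvSfree_append (db : PySem.Dict String (List String)) (seen : List String) (d : String) :
    pvSfree db (seen ++ [d]) =
      (((db.items.filter (fun kv => decide (kv.1 ∉ seen))).filter
          (fun kv => decide (kv.1 ≠ d))).map (fun kv => kv.2.length)).sum := by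
  unfold pvSfree
  rw [List.filter_filter]
  have hf : db.items.filter (fun kv => decide (kv.1 ∉ seen ++ [d])) =
      db.items.filter (fun a => decide (a.1 ≠ d) && decide (a.1 ∉ seen)) := by
    apply List.filter_congr
    intro x _
    by_cases h1 : x.1 = d <;> by_cases h2 : x.1 ∈ seen <;> simp [h1, h2]
  rw [hf]

theorem pvSfree_drop (db : PySem.Dict String (List String)) (seen : List String)
    (d : String) (hd : d ∉ seen) :
    (db.getD d []).length + pvSfree db (seen ++ [d]) ≤ pvSfree db seen := by
  rw [pvSfree_append]
  match hg : db.get? d with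
  | none =>
    rw [PySem.Dict.getD_of_get?_eq_none _ _ hg]
    have hsub : (((db.items.filter (fun kv => decide (kv.1 ∉ seen))).filter
        (fun kv => decide (kv.1 ≠ d)))).Sublist (db.items.filter (fun kv => decide (kv.1 ∉ seen))) :=
      List.filter_sublist
    have := pvSum_le_of_sublist hsub
    unfold pvSfree
    simpa using this
  | some vs =>
    rw [PySem.Dict.getD_of_get?_eq_some _ _ hg]
    have hmem : (d, vs) ∈ db.items.filter (fun kv => decide (kv.1 ∉ seen)) := by
      refine List.mem_filter.mpr ⟨PySem.Dict.mem_items_of_get?_eq_some _ hg, by simpa using hd⟩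
    have := pvSum_remove hmem
    unfold pvSfree
    omega

-- fuel sufficiency: with fuel above the potential, pvCountList returns, consuming at most the potential drop
theorem pvCountList_suff (db : PySem.Dict String (List String)) :
    ∀ (f : Nat) (stack seen : List String),
      stack.length + pvSfree db seen < f →
      ∃ out, pvCountList db f stack seen = some out ∧
        f + pvSfree db out.2.1 ≤ out.2.2.1 + (stack.length + pvSfree db seen) := by
  intro f
  induction f using Nat.strong_induction_on with
  | _ f ih =>
    intro stack seen h
    match stack with
    | [] =>
      refine ⟨(0, seen, ⟨f, Nat.le_refl f⟩), by simp [pvCountList], by simp⟩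
    | d :: rest =>
      match f with
      | 0 => simp at h
      | f + 1 =>
        simp only [List.length_cons] at h
        by_cases hd : d ∈ seen
        · have hlt : rest.length + pvSfree db seen < f := by omega
          obtain ⟨⟨c, s, g, hg⟩, heq, hbal⟩ := ih f (Nat.lt_succ_self f) rest seen hlt
          refine ⟨(c, s, ⟨g, by omega⟩), ?_, ?_⟩
          · simp [pvCountList, hd, heq]
          · simp only [List.length_cons]
            simp only at hbal
            omega
        · have hdrop := pvSfree_drop db seen d hd
          have hlt1 : (db.getD d []).length + pvSfree db (seen ++ [d]) < f := by omega
          obtain ⟨⟨c1, s1, g1, hg1⟩, heq1, hbal1⟩ :=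
            ih f (Nat.lt_succ_self f) (db.getD d []) (seen ++ [d]) hlt1
          simp only at hbal1
          have hlt2 : rest.length + pvSfree db s1 < g1 := by omega
          obtain ⟨⟨c2, s2, g2, hg2⟩, heq2, hbal2⟩ := ih g1 (by omega) rest s1 hlt2
          simp only at hbal2
          refine ⟨(1 + c1 + c2, s2, ⟨g2, by omega⟩), ?_, ?_⟩
          · simp [pvCountList, hd, heq1, heq2]
          · simp only [List.length_cons]
            omega

-- simulation: A's fuel-threaded recursive count and B's worklist loop visit the same nodes
theorem pvCountList_sim (db : PySem.Dict String (List String)) :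
    ∀ (f : Nat) (stack seen : List String) out,
      pvCountList db f stack seen = some out →
      (∀ rest, pvBLoop db f (stack ++ rest) seen = pvBLoop db out.2.2.1 rest out.2.1) ∧
      ((out.2.1.length : Int) = seen.length + out.1) := by
  intro f
  induction f using Nat.strong_induction_on with
  | _ f ih =>
    intro stack seen out hout
    match stack with
    | [] =>
      simp only [pvCountList] at hout
      obtain rfl : (0, seen, (⟨f, Nat.le_refl f⟩ : {g : Nat // g ≤ f})) = out := by
        exact Option.some.inj hout
      exact ⟨fun rest => by simp, by simp⟩
    | d :: rest =>
      match f with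
      | 0 => simp [pvCountList] at hout
      | f + 1 =>
        by_cases hd : d ∈ seen
        · simp only [pvCountList, hd, if_true] at hout
          match hrec : pvCountList db f rest seen with
          | none => rw [hrec] at hout; simp at hout
          | some ⟨c, s, g, hg⟩ =>
            rw [hrec] at hout
            simp only [Option.some.injEq] at hout
            obtain ⟨hsim, hlen⟩ := ih f (Nat.lt_succ_self f) rest seen _ hrec
            subst hout
            refine ⟨fun r => ?_, by simpa using hlen⟩
            rw [List.cons_append, pvBLoop, if_pos hd]
            exact hsim r
        · simp only [pvCountList, hd, if_false] at hout
          match hrec1 : pvCountList db f (db.getD d []) (seen ++ [d]) with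
          | none => rw [hrec1] at hout; simp at hout
          | some ⟨c1, s1, g1, hg1⟩ =>
            rw [hrec1] at hout
            dsimp only at hout
            obtain ⟨hsim1, hlen1⟩ := ih f (Nat.lt_succ_self f) _ _ _ hrec1
            match hrec2 : pvCountList db g1 rest s1 with
            | none => rw [hrec2] at hout; simp at hout
            | some ⟨c2, s2, g2, hg2⟩ =>
              rw [hrec2] at hout
              simp only [Option.some.injEq] at hout
              obtain ⟨hsim2, hlen2⟩ := ih g1 (by omega) _ _ _ hrec2
              subst hout
              refine ⟨fun r => ?_, ?_⟩
              · dsimp only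
                rw [List.cons_append, pvBLoop, if_neg hd,
                    PySem.Set.add_of_not_mem hd]
                rw [hsim1 (rest ++ r)]
                exact hsim2 r
              · simp only at hlen1 hlen2 ⊢
                simp only [List.length_append, List.length_cons, List.length_nil] at hlen1
                push_cast at hlen1 hlen2 ⊢
                omega

theorem pvCount_eq (db : PySem.Dict String (List String)) (m : String) :
    pvCountDeps db m [] = pvCountRdeps db m := by
  unfold pvCountDeps pvCountRdeps
  have hS : pvSfree db [m] ≤ (db.items.map (fun kv => kv.2.length)).sum := by
    exact pvSum_le_of_sublist List.filter_sublist
  have hlt : (db.getD m []).length + pvSfree db ([] ++ [m]) < pvFuel db m := by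
    unfold pvFuel
    simp only [List.nil_append]
    omega
  obtain ⟨⟨c, s, g, hg⟩, heq, _⟩ :=
    pvCountList_suff db (pvFuel db m) (db.getD m []) ([] ++ [m]) hlt
  obtain ⟨hsim, hlen⟩ := pvCountList_sim db _ _ _ _ heq
  rw [heq]
  have hb := hsim []
  rw [List.append_nil] at hb
  simp only [List.nil_append] at hb hlen
  rw [hb]
  simp only [pvBLoop]
  simp only [List.length_cons, List.length_nil] at hlen
  push_cast at hlen ⊢
  omega

theorem pvFold4 (l : List (String × String × String × String)) :
    ∀ (a b : PySem.Dict String String) (c e : PySem.Dict String (List String)),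
      l.foldl
        (fun st row =>
          (st.1.insert row.1 row.2.1,
           st.2.1.insert row.1 row.2.2.1,
           st.2.2.1.insert row.1 (pvSplitDeps row.2.2.2),
           (pvSplitDeps row.2.2.2).foldl
             (fun rd dep => rd.modify dep [] (fun l => l ++ [row.1])) st.2.2.2))
        (a, b, c, e) =
      (l.foldl (fun d row => d.insert row.1 row.2.1) a,
       l.foldl (fun d row => d.insert row.1 row.2.2.1) b,
       l.foldl (fun d row => d.insert row.1 (pvSplitDeps row.2.2.2)) c,
       l.foldl
         (fun d row => (pvSplitDeps row.2.2.2).foldl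
           (fun rd dep => rd.modify dep [] (fun l => l ++ [row.1])) d) e) := by
  induction l with
  | nil => intro a b c e; rfl
  | cons x t ih =>
    intro a b c e
    simp only [List.foldl_cons]
    exact ih _ _ _ _

theorem pvExtra_eq (p : String) :
    (if 0 < PySem.Str.len p then " (" ++ p ++ ")" else "") =
      (if p ≠ "" then " (" ++ p ++ ")" else "") := by
  by_cases h : p = ""
  · subst h; simp [PySem.Str.len]
  · simp [h]

theorem pvPre_eq (reader : List (String × String × String × String)) :
    reader.foldl
      (fun st row =>
        (st.1.insert row.1 row.2.1,
         st.2.1.insert row.1 row.2.2.1,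
         st.2.2.1.insert row.1 (pvSplitDeps row.2.2.2),
         (pvSplitDeps row.2.2.2).foldl
           (fun rd dep => rd.modify dep [] (fun l => l ++ [row.1])) st.2.2.2))
      ((PySem.Dict.empty : PySem.Dict String String),
       (PySem.Dict.empty : PySem.Dict String String),
       (PySem.Dict.empty : PySem.Dict String (List String)),
       (PySem.Dict.empty : PySem.Dict String (List String))) =
    (let parsed := reader.map (fun r => (r.1, r.2.1, r.2.2.1, pvSplitDeps r.2.2.2))
     (parsed.foldl (fun d r => d.insert r.1 r.2.1) PySem.Dict.empty,
      parsed.foldl (fun d r => d.insert r.1 r.2.2.1) PySem.Dict.empty,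
      parsed.foldl (fun d r => d.insert r.1 r.2.2.2) PySem.Dict.empty,
      parsed.foldl
        (fun d r => r.2.2.2.foldl (fun d' dep => d'.modify dep [] (fun l => l ++ [r.1])) d)
        PySem.Dict.empty)) := by
  rw [pvFold4]
  simp only [List.foldl_map]

theorem pvResults_eq (dT dP : PySem.Dict String String)
    (dD dR : PySem.Dict String (List String)) (ks : List String) :
    ks.foldl
      (fun res m =>
        if (dD.getD m []).length ≠ 0 then res
        else
          res ++ [(pvCountDeps dR m [],
                   m ++ (if 0 < PySem.Str.len (dP.getD m "")
                         then " (" ++ dP.getD m "" ++ ")" else ""),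
                   dT.getD m "")]) [] =
    (ks.filter (fun m => dD.getD m [] == [])).map
      (fun m =>
        (pvCountRdeps dR m,
         m ++ (if dP.getD m "" ≠ "" then " (" ++ dP.getD m "" ++ ")" else ""),
         dT.getD m "")) := by
  have h1 := PySem.List.foldl_congr_mem ks
      (fun res m =>
        if (dD.getD m []).length ≠ 0 then res
        else
          res ++ [(pvCountDeps dR m [],
                   m ++ (if 0 < PySem.Str.len (dP.getD m "")
                         then " (" ++ dP.getD m "" ++ ")" else ""),
                   dT.getD m "")])
      (fun res m =>
        if (dD.getD m [] == []) then
          res ++ [(pvCountDeps dR m [],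
                   m ++ (if 0 < PySem.Str.len (dP.getD m "")
                         then " (" ++ dP.getD m "" ++ ")" else ""),
                   dT.getD m "")]
        else res)
      []
      (by
        intro acc m _
        by_cases h : dD.getD m [] = []
        · simp [h]
        · simp [h, List.length_eq_zero_iff])
  rw [h1, PySem.List.foldl_append_if]
  simp only [List.nil_append]
  apply List.map_congr_left
  intro m _
  rw [pvCount_eq, pvExtra_eq]

-- ===== VERDICT (by name: the statement is the Claim_ definition above) =====
theorem process_spec : Claim_equal_process := by
  unfold Claim_equal_process Spec_process
  intro reader _
  unfold process process_alt
  dsimp only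
  rw [pvPre_eq]
  dsimp only
  congr 1
  exact pvResults_eq _ _ _ _ _
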